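-- pv_equiv track=rewrite | github.com/wowothk/genA | fungsi/prosedu1.py | int_encode
-- ===== SOURCE A (Python) =====
-- def int_encode(dc, customer, g):
--     # dengan g merupakan kapasitas yang dikirimkan dari dc_j ke kustomer i
--     temp_dc = [0]*len(dc)
--     temp_customer = [0]*len(customer)
--     v= [0]*len(customer)
--
--     for j in range(len(dc)):
--         temp_dc[j] = dc[j]
--
--     for i in range(len(customer)):
--         temp_customer[i] = customer[i]
--
--     for j in range(len(dc)):
--         for k in range(len(customer)):
--             if g[j][k] != 0:
--                 v[k] = j+1
--
--     return v
-- ===== SOURCE B (Python) =====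
-- def int_encode(dc, customer, g):
--     # column-major: for each customer, scan DCs from the last backwards and
--     # stop at the first nonzero shipment; 0 if no DC serves it
--     n = len(dc)
--     v = []
--     for k in range(len(customer)):
--         code = 0
--         for j in range(n - 1, -1, -1):
--             if g[j][k] != 0:
--                 code = j + 1
--                 break
--         v.append(code)
--     return v
-- ===== Notes on version B (the rewrite author's own statement) =====
-- stated objective: simpler
-- what changed: Replaces A's row-major full scan that keeps overwriting v[k] (plus two dead temp copies of dc/customer) with a column-major backwards scan per customer that stops at the first (= last-serving) nonzero DC.
-- outside the precondition, e.g. on int_encode([1, 2], [5, 6], [[1, 0]]): A raises IndexError, B raises IndexError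
import Mathlib
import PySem

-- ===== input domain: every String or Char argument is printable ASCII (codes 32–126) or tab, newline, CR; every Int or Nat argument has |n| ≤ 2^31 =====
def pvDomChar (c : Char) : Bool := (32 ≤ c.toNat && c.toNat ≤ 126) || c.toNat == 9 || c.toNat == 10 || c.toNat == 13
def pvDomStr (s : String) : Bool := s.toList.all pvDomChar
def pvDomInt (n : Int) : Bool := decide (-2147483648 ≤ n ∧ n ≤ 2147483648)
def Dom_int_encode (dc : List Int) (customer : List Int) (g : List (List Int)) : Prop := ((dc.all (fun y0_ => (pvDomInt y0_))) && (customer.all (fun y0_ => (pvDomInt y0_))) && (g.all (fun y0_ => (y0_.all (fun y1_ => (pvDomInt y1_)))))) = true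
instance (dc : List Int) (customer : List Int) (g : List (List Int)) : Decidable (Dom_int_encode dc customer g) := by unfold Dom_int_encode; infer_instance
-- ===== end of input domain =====

-- B drops A's dead temp copies and scans each customer's column backwards from the
-- last DC, stopping at the first nonzero shipment (simpler, early exit).

-- ===== PORT A =====
-- literal transliteration of A: dead temp_dc/temp_customer copies kept, then the
-- row-major double loop overwriting v[k]; g[j][k] ported as pyGetD (raising inputs
-- are excluded by Pre_int_encode)
def int_encode (dc : List Int) (customer : List Int) (g : List (List Int)) : List Int :=
  let _temp_dc :=
    (PySem.List.pyRange 0 dc.length 1).foldl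
      (fun t j => PySem.List.pySetD t j (PySem.List.pyGetD dc j 0))
      (List.replicate dc.length (0 : Int))
  let _temp_customer :=
    (PySem.List.pyRange 0 customer.length 1).foldl
      (fun t i => PySem.List.pySetD t i (PySem.List.pyGetD customer i 0))
      (List.replicate customer.length (0 : Int))
  (PySem.List.pyRange 0 dc.length 1).foldl
    (fun v j =>
      (PySem.List.pyRange 0 customer.length 1).foldl
        (fun w k =>
          if PySem.List.pyGetD (PySem.List.pyGetD g j []) k 0 ≠ 0 then
            PySem.List.pySetD w k (j + 1)
          else w)
        v)
    (List.replicate customer.length (0 : Int))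

-- ===== PORT B =====
-- B's inner backwards loop: scan j = n-1, n-2, …, 0 and stop at the first nonzero
def altFind (g : List (List Int)) (k : Nat) : Nat → Int
  | 0 => 0
  | Nat.succ j => if (g.getD j []).getD k 0 ≠ 0 then (j : Int) + 1 else altFind g k j

def int_encode_alt (dc : List Int) (customer : List Int) (g : List (List Int)) : List Int :=
  (List.range customer.length).map (fun k => altFind g k dc.length)

-- ===== PRECONDITION & SPEC =====
-- Pre_ excludes exactly the inputs on which Python A raises IndexError: whenever both
-- loops run, g must have a row for every DC and each such row an entry per customer.
def Pre_int_encode (dc : List Int) (customer : List Int) (g : List (List Int)) : Prop :=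
  dc = [] ∨ customer = [] ∨
    (dc.length ≤ g.length ∧ ∀ row ∈ g.take dc.length, customer.length ≤ row.length)
instance (dc : List Int) (customer : List Int) (g : List (List Int)) : Decidable (Pre_int_encode dc customer g) := by unfold Pre_int_encode; infer_instance

def pvWitness_int_encode : List Int × List Int × List (List Int) :=
  ([1, 2], [5, 6, 7], [[1, 0, 2], [0, 3, 4]])

def Spec_int_encode (dc : List Int) (customer : List Int) (g : List (List Int)) (out : List Int) : Prop := out = int_encode_alt dc customer g
instance (dc : List Int) (customer : List Int) (g : List (List Int)) (out : List Int) : Decidable (Spec_int_encode dc customer g out) := by unfold Spec_int_encode; infer_instance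

-- ===== CLAIM (what is proved, stated in full; the proofs are below) =====
def Claim_equal_int_encode : Prop := ∀ (dc : List Int) (customer : List Int) (g : List (List Int)), Dom_int_encode dc customer g → Pre_int_encode dc customer g → Spec_int_encode dc customer g (int_encode dc customer g)

-- ===== LEMMAS AND PROOFS =====

-- A's inner loop over k writes x into v[k] wherever row[k] ≠ 0, pointwise.
theorem inner_eq (row : List Int) (x : Int) :
    ∀ (m : Nat) (v : List Int), m ≤ v.length →
      (PySem.List.pyRange 0 (m : Int) 1).foldl
        (fun w k => if PySem.List.pyGetD row k 0 ≠ 0 then PySem.List.pySetD w k x else w) v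
      = (List.range m).map (fun k => if row.getD k 0 ≠ 0 then x else v.getD k 0)
          ++ v.drop m := by
  intro m
  induction m with
  | zero => intro v _; simp
  | succ m ih =>
    intro v hv
    have hcast : ((m + 1 : Nat) : Int) = (m : Int) + 1 := by push_cast; ring
    rw [hcast, PySem.List.pyRange_one_succ_right (by positivity), List.foldl_append,
      ih v (by omega), List.range_succ, List.map_append]
    have hm : m < v.length := by omega
    have hdrop : v.drop m = v[m] :: v.drop (m + 1) := List.drop_eq_getElem_cons hm
    simp only [List.foldl_cons, List.foldl_nil, PySem.List.pyGetD_natCast,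
      PySem.List.pySetD_natCast, List.map_cons, List.map_nil,
      List.getD_eq_getElem?_getD]
    by_cases hc : row[m]?.getD 0 = 0
    · rw [if_neg (not_not_intro hc), if_neg (not_not_intro hc), hdrop, List.append_assoc]
      congr 1
      simp [List.getElem?_eq_getElem hm]
    · rw [if_pos hc, if_pos hc, hdrop, List.set_append, List.append_assoc]
      simp
      rw [hdrop]
      rfl

-- A's outer loop up to n DCs produces, per customer k, B's backwards search altFind g k n.
theorem outer_eq (g : List (List Int)) (m : Nat) :
    ∀ n : Nat,
      (PySem.List.pyRange 0 (n : Int) 1).foldl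
        (fun v j =>
          (PySem.List.pyRange 0 (m : Int) 1).foldl
            (fun w k =>
              if PySem.List.pyGetD (PySem.List.pyGetD g j []) k 0 ≠ 0 then
                PySem.List.pySetD w k (j + 1)
              else w) v)
        (List.replicate m (0 : Int))
      = (List.range m).map (fun k => altFind g k n) := by
  intro n
  induction n with
  | zero =>
    simp [PySem.List.pyRange_zero_nat, altFind, List.map_const']
  | succ n ih =>
    have hcast : ((n + 1 : Nat) : Int) = (n : Int) + 1 := by push_cast; ring
    rw [hcast, PySem.List.pyRange_one_succ_right (by positivity), List.foldl_append,
      ih]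
    simp only [List.foldl_cons, List.foldl_nil, PySem.List.pyGetD_natCast]
    rw [inner_eq _ _ m _ (by simp)]
    rw [List.drop_eq_nil_of_le (by simp), List.append_nil]
    refine List.map_congr_left ?_
    intro k hk
    have hk' : k < m := List.mem_range.mp hk
    have hget : (List.map (fun k => altFind g k n) (List.range m)).getD k 0
        = altFind g k n := by
      rw [List.getD_eq_getElem?_getD]
      simp [hk']
    rw [hget]
    simp [altFind]

-- ===== VERDICT (by name: the statement is the Claim_ definition above) =====
theorem int_encode_spec : Claim_equal_int_encode := by
  intro dc customer g _ _
  unfold Spec_int_encode int_encode int_encode_alt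
  exact outer_eq g customer.length dc.length
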